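-- pv_equiv track=rewrite | github.com/tylerforesthauser/pianist | src/pianist/musical_analysis.py | _detect_transposed_match
-- ===== SOURCE A (Python) =====
-- def _extract_interval_pattern(pitches: list[int]) -> tuple[int, ...]:
--     """
--     Extract interval pattern from a sequence of pitches.
--
--     Returns:
--         Tuple of intervals in semitones
--     """
--     if len(pitches) < 2:
--         return tuple()
--
--     intervals: list[int] = []
--     for i in range(len(pitches) - 1):
--         intervals.append(pitches[i + 1] - pitches[i])
--
--     return tuple(intervals)
--
-- def _normalize_pitch_sequence(pitches: list[int]) -> list[int]:
--     """
--     Normalize a pitch sequence to start at 0 (for transposition-aware matching).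
--
--     Returns:
--         List of pitches normalized to start at 0
--     """
--     if not pitches:
--         return []
--
--     first_pitch = pitches[0]
--     return [p - first_pitch for p in pitches]
--
-- def _detect_transposed_match(pattern1: list[int], pattern2: list[int], tolerance: int = 1) -> bool:
--     """
--     Check if two pitch patterns match when transposed.
--
--     Args:
--         pattern1: First pitch pattern
--         pattern2: Second pitch pattern
--         tolerance: Maximum difference in transposition (in semitones)
--
--     Returns:
--         True if patterns match when transposed
--     """
--     if len(pattern1) != len(pattern2) or len(pattern1) < 2:
--         return False
--
--     # Extract interval patterns
--     intervals1 = _extract_interval_pattern(pattern1)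
--     intervals2 = _extract_interval_pattern(pattern2)
--
--     # Check if interval patterns match
--     if intervals1 == intervals2:
--         return True
--
--     # Check transposition: normalize both to start at 0
--     norm1 = _normalize_pitch_sequence(pattern1)
--     norm2 = _normalize_pitch_sequence(pattern2)
--
--     if norm1 == norm2:
--         return True
--
--     # Check if one is a transposition of the other (within tolerance)
--     if len(pattern1) == len(pattern2):
--         transposition = pattern2[0] - pattern1[0]
--         if abs(transposition) <= tolerance:
--             # Check if all intervals match after transposition
--             transposed1 = [p + transposition for p in pattern1]
--             if transposed1 == pattern2:
--                 return True
--
--     return False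
-- ===== SOURCE B (Python) =====
-- def _detect_transposed_match(pattern1: list[int], pattern2: list[int], tolerance: int = 1) -> bool:
--     """Patterns match iff they have the same length >= 2 and pattern2 is an
--     exact transposition of pattern1 (one constant offset across all notes)."""
--     if len(pattern1) != len(pattern2) or len(pattern1) < 2:
--         return False
--     offset = pattern2[0] - pattern1[0]
--     return all(b - a == offset for a, b in zip(pattern1, pattern2))
-- ===== Notes on version B (the rewrite author's own statement) =====
-- stated objective: simpler
-- what changed: A builds two interval tuples, two normalized copies and a transposed copy across three successive equality tests; B maintains one constant offset and makes a single short-circuiting zip pass, since a match under A's tests is exactly an exact transposition of equal length >= 2 (the normalization and tolerance branches are redundant).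
import Mathlib
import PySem

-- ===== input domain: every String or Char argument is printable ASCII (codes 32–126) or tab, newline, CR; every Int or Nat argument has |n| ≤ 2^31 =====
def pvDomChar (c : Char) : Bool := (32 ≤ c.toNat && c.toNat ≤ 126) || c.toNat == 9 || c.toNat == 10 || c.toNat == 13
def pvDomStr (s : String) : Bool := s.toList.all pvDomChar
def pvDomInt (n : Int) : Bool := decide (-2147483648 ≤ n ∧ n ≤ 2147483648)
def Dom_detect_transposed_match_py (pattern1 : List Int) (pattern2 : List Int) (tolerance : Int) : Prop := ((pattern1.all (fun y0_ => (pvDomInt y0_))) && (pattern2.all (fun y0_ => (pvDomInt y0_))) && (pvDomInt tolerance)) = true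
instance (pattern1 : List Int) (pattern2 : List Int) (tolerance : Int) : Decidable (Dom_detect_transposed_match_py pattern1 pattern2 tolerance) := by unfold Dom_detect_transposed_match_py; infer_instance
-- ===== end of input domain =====

-- B replaces A's three tests over five intermediate lists (interval tuples, normalized
-- copies, a transposed copy) by one constant offset and a single zip pass (objective: simpler).

-- ===== PORT A =====
-- _extract_interval_pattern: loop over range(len-1) appending pitches[i+1]-pitches[i]
def pvExtractIntervalPattern (pitches : List Int) : List Int :=
  if pitches.length < 2 then []
  else (PySem.List.pyRange 0 ((pitches.length : Int) - 1) 1).foldl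
    (fun intervals i =>
      intervals ++ [PySem.List.pyGetD pitches (i + 1) 0 - PySem.List.pyGetD pitches i 0]) []

-- _normalize_pitch_sequence: pitches[0] is taken on a nonempty list, where headI is exact
def pvNormalizePitchSequence (pitches : List Int) : List Int :=
  if pitches = [] then []
  else
    let first := pitches.headI
    pitches.map (fun p => p - first)

def detect_transposed_match_py (pattern1 : List Int) (pattern2 : List Int) (tolerance : Int) : Bool :=
  if pattern1.length ≠ pattern2.length ∨ pattern1.length < 2 then false
  else
    let intervals1 := pvExtractIntervalPattern pattern1
    let intervals2 := pvExtractIntervalPattern pattern2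
    if intervals1 = intervals2 then true
    else
      let norm1 := pvNormalizePitchSequence pattern1
      let norm2 := pvNormalizePitchSequence pattern2
      if norm1 = norm2 then true
      else if pattern1.length = pattern2.length then
        -- pattern1[0], pattern2[0]: both lists nonempty here (length ≥ 2), so headI is exact
        let transposition := pattern2.headI - pattern1.headI
        if |transposition| ≤ tolerance then
          let transposed1 := pattern1.map (fun p => p + transposition)
          if transposed1 = pattern2 then true else false
        else false
      else false

-- ===== PORT B =====
def detect_transposed_match_py_alt (pattern1 : List Int) (pattern2 : List Int) (tolerance : Int) : Bool :=
  if pattern1.length ≠ pattern2.length ∨ pattern1.length < 2 then false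
  else
    let offset := pattern2.headI - pattern1.headI
    (pattern1.zip pattern2).all (fun ab => ab.2 - ab.1 == offset)

-- ===== PRECONDITION & SPEC =====
def Spec_detect_transposed_match_py (pattern1 : List Int) (pattern2 : List Int) (tolerance : Int) (out : Bool) : Prop := out = detect_transposed_match_py_alt pattern1 pattern2 tolerance
instance (pattern1 : List Int) (pattern2 : List Int) (tolerance : Int) (out : Bool) : Decidable (Spec_detect_transposed_match_py pattern1 pattern2 tolerance out) := by unfold Spec_detect_transposed_match_py; infer_instance

-- ===== CLAIM (what is proved, stated in full; the proofs are below) =====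
def Claim_equal_detect_transposed_match_py : Prop := ∀ (pattern1 : List Int) (pattern2 : List Int) (tolerance : Int), Dom_detect_transposed_match_py pattern1 pattern2 tolerance → Spec_detect_transposed_match_py pattern1 pattern2 tolerance (detect_transposed_match_py pattern1 pattern2 tolerance)

-- ===== LEMMAS AND PROOFS =====

theorem pv_rangemap (p : List Int) :
    (List.range (p.length - 1)).map (fun k => p.getD (k+1) 0 - p.getD k 0)
      = List.zipWith (fun x y => y - x) p p.tail := by
  induction p with
  | nil => simp
  | cons a t ih =>
    rcases t with _ | ⟨b, t'⟩
    · simp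
    · have hl : (a :: b :: t').length - 1 = t'.length + 1 := by simp
      rw [hl, List.range_succ_eq_map, List.map_cons, List.map_map]
      simp only [List.zipWith_cons_cons, List.tail_cons, List.cons.injEq]
      refine ⟨by simp, ?_⟩
      have hl2 : (b :: t').length - 1 = t'.length := by simp
      rw [hl2] at ih
      simp only [List.tail_cons] at ih
      rw [← ih]
      apply List.map_congr_left
      intro k _
      simp [Nat.succ_eq_add_one]

theorem pvIntervals_eq_zipWith (p : List Int) :
    pvExtractIntervalPattern p = List.zipWith (fun x y => y - x) p p.tail := by
  unfold pvExtractIntervalPattern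
  rcases p with _ | ⟨a, _ | ⟨b, t⟩⟩
  · simp
  · simp
  · have hlen2 : (a :: b :: t).length = t.length + 2 := by simp
    rw [if_neg (by omega), PySem.List.foldl_append_singleton_eq_map, List.nil_append]
    have hcast : ((a :: b :: t).length : Int) - 1 = ((t.length + 1 : Nat) : Int) := by
      rw [hlen2]; push_cast; ring
    rw [hcast, PySem.List.pyRange_zero_nat, List.map_map]
    rw [← pv_rangemap (a :: b :: t)]
    rw [show (a :: b :: t).length - 1 = t.length + 1 from by simp]
    apply List.map_congr_left
    intro k _
    simp only [Function.comp]
    rw [show ((k : Int) + 1) = ((k + 1 : Nat) : Int) from by push_cast; ring,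
      PySem.List.pyGetD_natCast, PySem.List.pyGetD_natCast]

theorem pv_all_offset_iff (t1 : List Int) :
    ∀ (t2 : List Int) (a b c : Int), t1.length = t2.length →
    ((((a :: t1).zip (b :: t2)).all (fun ab => ab.2 - ab.1 == c)) = true ↔
      (b - a = c ∧ List.zipWith (fun x y => y - x) (a :: t1) t1
        = List.zipWith (fun x y => y - x) (b :: t2) t2)) := by
  induction t1 with
  | nil =>
    intro t2 a b c hlen
    have h0 : t2 = [] := List.length_eq_zero_iff.mp hlen.symm
    subst h0
    simp
  | cons x t1 ih =>
    intro t2 a b c hlen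
    rcases t2 with _ | ⟨y, t2⟩
    · simp at hlen
    · have hlen' : t1.length = t2.length := by simpa using hlen
      have h := ih t2 x y c hlen'
      rw [show (a :: x :: t1).zip (b :: y :: t2) = (a, b) :: ((x :: t1).zip (y :: t2)) from rfl,
        List.all_cons, Bool.and_eq_true]
      simp only [List.zipWith_cons_cons, List.cons.injEq] at *
      constructor
      · rintro ⟨h1, h2⟩
        obtain ⟨h3, h4⟩ := h.mp h2
        have h1' : b - a = c := by simpa using h1
        exact ⟨h1', by omega, h4⟩
      · rintro ⟨h1, h2, h3⟩
        refine ⟨by simpa using h1, h.mpr ⟨by omega, h3⟩⟩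

theorem pv_norm_iff (p1 : List Int) :
    ∀ (p2 : List Int) (a b : Int), p1.length = p2.length →
    (p1.map (fun p => p - a) = p2.map (fun p => p - b) ↔
      ((p1.zip p2).all (fun ab => ab.2 - ab.1 == b - a)) = true) := by
  induction p1 with
  | nil =>
    intro p2 a b hlen
    have h0 : p2 = [] := List.length_eq_zero_iff.mp hlen.symm
    subst h0; simp
  | cons x t1 ih =>
    intro p2 a b hlen
    rcases p2 with _ | ⟨y, t2⟩
    · simp at hlen
    · have hlen' : t1.length = t2.length := by simpa using hlen
      rw [show (x :: t1).zip (y :: t2) = (x, y) :: (t1.zip t2) from rfl,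
        List.all_cons, Bool.and_eq_true, List.map_cons, List.map_cons]
      simp only [List.cons.injEq]
      rw [ih t2 a b hlen']
      constructor
      · rintro ⟨h1, h2⟩; exact ⟨by simp; omega, h2⟩
      · rintro ⟨h1, h2⟩
        have h1' : y - x = b - a := by simpa using h1
        exact ⟨by omega, h2⟩

theorem pv_map_add_iff (p1 : List Int) :
    ∀ (p2 : List Int) (t : Int), p1.length = p2.length →
    (p1.map (fun p => p + t) = p2 ↔
      ((p1.zip p2).all (fun ab => ab.2 - ab.1 == t)) = true) := by
  induction p1 with
  | nil =>
    intro p2 t hlen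
    have h0 : p2 = [] := List.length_eq_zero_iff.mp hlen.symm
    subst h0; simp
  | cons x t1 ih =>
    intro p2 t hlen
    rcases p2 with _ | ⟨y, t2⟩
    · simp at hlen
    · have hlen' : t1.length = t2.length := by simpa using hlen
      rw [show (x :: t1).zip (y :: t2) = (x, y) :: (t1.zip t2) from rfl,
        List.all_cons, Bool.and_eq_true, List.map_cons]
      simp only [List.cons.injEq]
      rw [ih t2 t hlen']
      constructor
      · rintro ⟨h1, h2⟩; exact ⟨by simp; omega, h2⟩
      · rintro ⟨h1, h2⟩
        have h1' : y - x = t := by simpa using h1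
        exact ⟨by omega, h2⟩

-- ===== VERDICT (by name: the statement is the Claim_ definition above) =====
theorem detect_transposed_match_py_spec : Claim_equal_detect_transposed_match_py := by
  intro p1 p2 tol _
  unfold Spec_detect_transposed_match_py detect_transposed_match_py detect_transposed_match_py_alt
  by_cases hguard : p1.length ≠ p2.length ∨ p1.length < 2
  · simp only [if_pos hguard]
  · simp only [if_neg hguard]
    rw [not_or, not_not, not_lt] at hguard
    obtain ⟨hlen, hge⟩ := hguard
    rcases p1 with _ | ⟨a, t1⟩
    · simp at hge
    rcases p2 with _ | ⟨b, t2⟩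
    · simp at hlen
    have hlen' : t1.length = t2.length := by simpa using hlen
    have hkey := pv_all_offset_iff t1 t2 a b (b - a) hlen'
    have hintervals :
        (pvExtractIntervalPattern (a :: t1) = pvExtractIntervalPattern (b :: t2)) ↔
        (((a :: t1).zip (b :: t2)).all (fun ab => ab.2 - ab.1 == b - a)) = true := by
      rw [pvIntervals_eq_zipWith, pvIntervals_eq_zipWith, hkey]
      simp
    simp only [List.headI]
    by_cases hB : (((a :: t1).zip (b :: t2)).all (fun ab => ab.2 - ab.1 == b - a)) = true
    · rw [hB, if_pos (hintervals.mpr hB)]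
    · rw [Bool.not_eq_true] at hB
      rw [hB, if_neg (fun h => by have h2 := hintervals.mp h; rw [hB] at h2; exact Bool.false_ne_true h2)]
      have hnorm : ¬ (pvNormalizePitchSequence (a :: t1) = pvNormalizePitchSequence (b :: t2)) := by
        intro h
        unfold pvNormalizePitchSequence at h
        simp only [if_neg (by simp : ¬ (a :: t1 = ([] : List Int))),
          if_neg (by simp : ¬ (b :: t2 = ([] : List Int))), List.headI] at h
        have h2 := (pv_norm_iff (a :: t1) (b :: t2) a b hlen).mp h
        rw [hB] at h2; exact Bool.false_ne_true h2
      rw [if_neg hnorm, if_pos hlen]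
      by_cases htol : |b - a| ≤ tol
      · rw [if_pos htol]
        have hmap : ¬ ((a :: t1).map (fun p => p + (b - a)) = b :: t2) := by
          intro h
          have h2 := (pv_map_add_iff (a :: t1) (b :: t2) (b - a) hlen).mp h
          rw [hB] at h2; exact Bool.false_ne_true h2
        rw [if_neg hmap]
      · rw [if_neg htol]
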